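-- pv_equiv track=rewrite | github.com/cog-isa/htm-core | apps/hierarchy.py | zip_binary_matrix
-- ===== SOURCE A (Python) =====
-- def zip_binary_matrix(a):
--     res = 0
--     x = 1
--     for i, I in enumerate(a):
--         for j, J in enumerate(a):
--             if a[i][j]:
--                 res += x
--             x *= 2
--     return res
-- ===== SOURCE B (Python) =====
-- def zip_binary_matrix(a):
--     n = len(a)
--     bits = [1 if a[i][j] else 0 for i in range(n) for j in range(n)]
--     res = 0
--     for b in reversed(bits):
--         res = res * 2 + b
--     return res
-- ===== Notes on version B (the rewrite author's own statement) =====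
-- stated objective: alternative
-- what changed: B first materialises the flat 0/1 bit list of the matrix, then evaluates it as a binary numeral by a Horner fold over the reversed list (res = res*2 + bit), instead of A's single pass that threads a running power-of-two multiplier through both nested loops.
import Mathlib
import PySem

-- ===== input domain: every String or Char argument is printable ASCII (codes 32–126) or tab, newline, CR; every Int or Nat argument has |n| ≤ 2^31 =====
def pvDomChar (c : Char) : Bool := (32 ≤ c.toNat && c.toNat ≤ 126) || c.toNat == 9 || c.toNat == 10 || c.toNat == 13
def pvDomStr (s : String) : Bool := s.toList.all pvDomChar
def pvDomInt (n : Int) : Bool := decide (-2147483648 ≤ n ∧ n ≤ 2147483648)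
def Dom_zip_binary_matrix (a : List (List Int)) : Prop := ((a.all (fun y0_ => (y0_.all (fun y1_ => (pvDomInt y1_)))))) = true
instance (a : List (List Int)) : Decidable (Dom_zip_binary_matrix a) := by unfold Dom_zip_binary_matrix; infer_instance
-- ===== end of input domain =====

-- B materialises the flat 0/1 bit list and evaluates it as a binary numeral by a
-- Horner fold over the reversed list, instead of A's running power-of-two multiplier.

-- ===== PORT A =====
-- Literal port of A: state (res, x); both loops over enumerate(a); reads a[i][j]
-- (pyGetD is exact under Pre_, which puts every index in range).
def zip_binary_matrix (a : List (List Int)) : Int :=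
  ((PySem.List.enumerate a 0).foldl
    (fun (s : Int × Int) (iI : Int × List Int) =>
      (PySem.List.enumerate a 0).foldl
        (fun (s : Int × Int) (jJ : Int × List Int) =>
          (if PySem.List.pyGetD (PySem.List.pyGetD a iI.1 []) jJ.1 0 ≠ 0
           then s.1 + s.2 else s.1, s.2 * 2))
        s)
    ((0 : Int), (1 : Int))).1

-- ===== PORT B =====
-- Literal port of B: build the flat bit list (nested comprehension = flatten of map),
-- then a Horner fold over its reverse.
def zip_binary_matrix_alt (a : List (List Int)) : Int :=
  let n : Int := a.length
  let bits : List Int :=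
    ((PySem.List.pyRange 0 n 1).map (fun i =>
      (PySem.List.pyRange 0 n 1).map (fun j =>
        if PySem.List.pyGetD (PySem.List.pyGetD a i []) j 0 ≠ 0 then (1 : Int) else 0))).flatten
  bits.reverse.foldl (fun res b => res * 2 + b) 0

-- ===== PRECONDITION & SPEC =====
-- Pre_: exactly the inputs where Python A returns (a[i][j] in range for all i, j < len(a));
-- on shorter rows both A and B raise IndexError at the same access.
def Pre_zip_binary_matrix (a : List (List Int)) : Prop :=
  ∀ row ∈ a, a.length ≤ row.length
instance (a : List (List Int)) : Decidable (Pre_zip_binary_matrix a) := by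
  unfold Pre_zip_binary_matrix; infer_instance

def pvWitness_zip_binary_matrix : List (List Int) := [[1, 0], [0, 5]]

def Spec_zip_binary_matrix (a : List (List Int)) (out : Int) : Prop := out = zip_binary_matrix_alt a
instance (a : List (List Int)) (out : Int) : Decidable (Spec_zip_binary_matrix a out) := by unfold Spec_zip_binary_matrix; infer_instance

-- ===== CLAIM (what is proved, stated in full; the proofs are below) =====
def Claim_equal_zip_binary_matrix : Prop := ∀ (a : List (List Int)), Dom_zip_binary_matrix a → Pre_zip_binary_matrix a → Spec_zip_binary_matrix a (zip_binary_matrix a)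

-- ===== LEMMAS AND PROOFS =====

-- A fold over enumerate whose function uses only the index equals the fold over the range.
theorem foldl_enum_fst {β : Type} (F : β → Int → β) :
    ∀ (l : List (List Int)) (s : Int) (init : β),
      (PySem.List.enumerate l s).foldl (fun b p => F b p.1) init
        = (PySem.List.pyRange s (s + l.length) 1).foldl F init := by
  intro l
  induction l with
  | nil =>
      intro s init
      simp [PySem.List.enumerate_nil, PySem.List.pyRange_one_eq_nil (le_refl s)]
  | cons x xs ih =>
      intro s init
      rw [PySem.List.enumerate_cons,
          PySem.List.pyRange_one_cons (by simp only [List.length_cons]; push_cast; omega : s < s + ((x :: xs).length : Int))]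
      simp only [List.foldl_cons]
      rw [show s + (((x :: xs).length : Nat) : Int) = (s + 1) + ((xs.length : Nat) : Int) by
            simp only [List.length_cons]; push_cast; ring]
      exact ih (s + 1) (F init s)

-- The value of a bit list, least-significant bit first.
def bval (l : List Int) : Int := l.foldr (fun b acc => b + 2 * acc) 0

-- A's inner-loop value of row, over column indices 0..m-1.
def rowS (row : List Int) (m : Nat) : Int :=
  bval ((PySem.List.pyRange 0 (m : Int) 1).map
    (fun j => if PySem.List.pyGetD row j 0 ≠ 0 then (1 : Int) else 0))

theorem bval_append (xs ys : List Int) :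
    bval (xs ++ ys) = bval xs + 2 ^ xs.length * bval ys := by
  induction xs with
  | nil => simp [bval]
  | cons x xs ih => simp [bval, List.foldr_append] at ih ⊢; rw [ih]; ring

-- The reversed Horner fold computes bval.
theorem horner_reverse (l : List Int) :
    l.reverse.foldl (fun res b => res * 2 + b) 0 = bval l := by
  induction l with
  | nil => simp [bval]
  | cons x xs ih =>
      simp only [List.reverse_cons, List.foldl_append, List.foldl_cons, List.foldl_nil, ih]
      simp [bval]; ring

theorem rowS_succ (row : List Int) (m : Nat) :
    rowS row (m + 1)
      = if PySem.List.pyGetD row (m : Int) 0 ≠ 0 then rowS row m + 2 ^ m else rowS row m := by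
  unfold rowS
  rw [show ((m + 1 : Nat) : Int) = (m : Int) + 1 by push_cast; ring,
      PySem.List.pyRange_one_succ_right (by exact Int.natCast_nonneg _), List.map_append,
      bval_append]
  simp [PySem.List.length_pyRange_one, bval]
  split_ifs <;> ring

-- A's inner loop from state (res, x) adds x * rowS and multiplies x by 2^m.
theorem innerA (row : List Int) :
    ∀ (m : Nat) (res x : Int),
      (PySem.List.pyRange 0 (m : Int) 1).foldl
        (fun (s : Int × Int) (j : Int) =>
          (if PySem.List.pyGetD row j 0 ≠ 0 then s.1 + s.2 else s.1, s.2 * 2))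
        (res, x)
      = (res + x * rowS row m, x * 2 ^ m) := by
  intro m
  induction m with
  | zero => intro res x; simp [rowS, bval]
  | succ m ih =>
      intro res x
      rw [show ((m + 1 : Nat) : Int) = (m : Int) + 1 by push_cast; ring,
          PySem.List.pyRange_one_succ_right (by exact Int.natCast_nonneg _), List.foldl_append, ih]
      simp only [List.foldl_cons, List.foldl_nil, rowS_succ, pow_succ]
      split_ifs with h <;> exact Prod.ext (by ring) (by ring)

-- Outer loops: A's running state vs the per-row weighted sum, for the first i rows.
theorem outer_eq (a : List (List Int)) :
    ∀ (i : Nat),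
      (PySem.List.pyRange 0 (i : Int) 1).foldl
        (fun (s : Int × Int) (iv : Int) =>
          (PySem.List.pyRange 0 (a.length : Int) 1).foldl
            (fun (s : Int × Int) (j : Int) =>
              (if PySem.List.pyGetD (PySem.List.pyGetD a iv []) j 0 ≠ 0
               then s.1 + s.2 else s.1, s.2 * 2))
            s)
        ((0 : Int), (1 : Int))
      = ((PySem.List.pyRange 0 (i : Int) 1).foldl
          (fun (res : Int) (iv : Int) =>
            res + rowS (PySem.List.pyGetD a iv []) a.length
                    * 2 ^ (iv * (a.length : Int)).toNat)
          0,
         2 ^ (i * a.length)) := by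
  intro i
  induction i with
  | zero => simp
  | succ i ih =>
      rw [show ((i + 1 : Nat) : Int) = (i : Int) + 1 by push_cast; ring,
          PySem.List.pyRange_one_succ_right (by exact Int.natCast_nonneg _), List.foldl_append,
          List.foldl_append, ih]
      simp only [List.foldl_cons, List.foldl_nil]
      rw [innerA]
      refine Prod.ext ?_ ?_
      · show _ + _ * _ = _ + _ * _
        rw [show ((i : Int) * (a.length : Int)).toNat = i * a.length by
              rw [← Int.natCast_mul, Int.toNat_natCast]]
        ring
      · show (2 : Int) ^ (i * a.length) * 2 ^ a.length = 2 ^ ((i + 1) * a.length)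
        rw [← pow_add]; ring_nf

-- B's flattened bit list of the first i rows: its bval is the weighted row sum, and its length is i*n.
theorem bits_eq (a : List (List Int)) :
    ∀ (i : Nat),
      bval (((PySem.List.pyRange 0 (i : Int) 1).map (fun iv =>
          (PySem.List.pyRange 0 (a.length : Int) 1).map (fun j =>
            if PySem.List.pyGetD (PySem.List.pyGetD a iv []) j 0 ≠ 0 then (1 : Int) else 0))).flatten)
        = (PySem.List.pyRange 0 (i : Int) 1).foldl
            (fun (res : Int) (iv : Int) =>
              res + rowS (PySem.List.pyGetD a iv []) a.length
                      * 2 ^ (iv * (a.length : Int)).toNat)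
            0
      ∧ (((PySem.List.pyRange 0 (i : Int) 1).map (fun iv =>
          (PySem.List.pyRange 0 (a.length : Int) 1).map (fun j =>
            if PySem.List.pyGetD (PySem.List.pyGetD a iv []) j 0 ≠ 0 then (1 : Int) else 0))).flatten).length
        = i * a.length := by
  intro i
  induction i with
  | zero => simp [bval]
  | succ i ih =>
      obtain ⟨ih1, ih2⟩ := ih
      rw [show ((i + 1 : Nat) : Int) = (i : Int) + 1 by push_cast; ring,
          PySem.List.pyRange_one_succ_right (by exact Int.natCast_nonneg _)]
      simp only [List.map_append, List.map_cons, List.map_nil, List.flatten_append,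
        List.flatten_cons, List.flatten_nil, List.append_nil, List.foldl_append,
        List.foldl_cons, List.foldl_nil]
      constructor
      · rw [bval_append, ih1, ih2]
        have hr : bval ((PySem.List.pyRange 0 (a.length : Int) 1).map (fun j =>
            if PySem.List.pyGetD (PySem.List.pyGetD a (i : Int) []) j 0 ≠ 0 then (1 : Int) else 0))
            = rowS (PySem.List.pyGetD a (i : Int) []) a.length := by
          unfold rowS; norm_num
        rw [hr, show ((i : Int) * (a.length : Int)).toNat = i * a.length by
              rw [← Int.natCast_mul, Int.toNat_natCast]]
        ring
      · rw [List.length_append, ih2, List.length_map, PySem.List.length_pyRange_one]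
        simp [Nat.succ_mul]

-- ===== VERDICT (by name: the statement is the Claim_ definition above) =====
theorem zip_binary_matrix_spec : Claim_equal_zip_binary_matrix := by
  intro a _ _
  show zip_binary_matrix a = zip_binary_matrix_alt a
  unfold zip_binary_matrix zip_binary_matrix_alt
  have hinner : ∀ (i : Int) (s : Int × Int),
      (PySem.List.enumerate a 0).foldl
        (fun (s : Int × Int) (jJ : Int × List Int) =>
          (if PySem.List.pyGetD (PySem.List.pyGetD a i []) jJ.1 0 ≠ 0
           then s.1 + s.2 else s.1, s.2 * 2)) s
        = (PySem.List.pyRange 0 (a.length : Int) 1).foldl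
            (fun (s : Int × Int) (j : Int) =>
              (if PySem.List.pyGetD (PySem.List.pyGetD a i []) j 0 ≠ 0
               then s.1 + s.2 else s.1, s.2 * 2)) s := by
    intro i s
    rw [foldl_enum_fst (fun (s : Int × Int) (j : Int) =>
          (if PySem.List.pyGetD (PySem.List.pyGetD a i []) j 0 ≠ 0
           then s.1 + s.2 else s.1, s.2 * 2)) a 0 s]
    norm_num
  rw [foldl_enum_fst (fun (s : Int × Int) (i : Int) =>
        (PySem.List.enumerate a 0).foldl
          (fun (s : Int × Int) (jJ : Int × List Int) =>
            (if PySem.List.pyGetD (PySem.List.pyGetD a i []) jJ.1 0 ≠ 0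
             then s.1 + s.2 else s.1, s.2 * 2)) s) a 0 ((0 : Int), (1 : Int))]
  simp only [hinner, zero_add]
  rw [outer_eq a a.length, horner_reverse]
  exact ((bits_eq a a.length).1).symm
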